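-- pv_equiv track=rewrite | github.com/Timekilla-tech/Algorithm_301 | lab8/bicyclegui.py | assignBicycles
-- ===== SOURCE A (Python) =====
-- import heapq
--
-- def assignBicycles(students, bicycles):
--     heap = []
--     for i, (sx, sy) in enumerate(students):
--         for j, (bx, by) in enumerate(bicycles):
--             distance = abs(sx - bx) + abs(sy - by)
--             heapq.heappush(heap, (distance, i, j))
--
--     assigned_students = set()
--     assigned_bikes = set()
--     result = [-1] * len(students)
--
--     while len(assigned_students) < len(students):
--         _, student_index, bike_index = heapq.heappop(heap)
--         if student_index not in assigned_students and bike_index not in assigned_bikes: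
--             result[student_index] = bike_index
--             assigned_students.add(student_index)
--             assigned_bikes.add(bike_index)
--
--     return result
-- ===== SOURCE B (Python) =====
-- def assignBicycles(students, bicycles):
--     # bucket pairs by Manhattan distance instead of a global heap
--     buckets = {}
--     for i, (sx, sy) in enumerate(students):
--         for j, (bx, by) in enumerate(bicycles):
--             d = abs(sx - bx) + abs(sy - by)
--             if d in buckets:
--                 buckets[d].append((i, j))
--             else:
--                 buckets[d] = [(i, j)]
--
--     result = [-1] * len(students)
--     assigned_students = set()
--     assigned_bikes = set()
--     for d in sorted(buckets):
--         for i, j in buckets[d]: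
--             if len(assigned_students) == len(students):
--                 return result
--             if i not in assigned_students and j not in assigned_bikes:
--                 result[i] = j
--                 assigned_students.add(i)
--                 assigned_bikes.add(j)
--     return result
-- ===== Notes on version B (the rewrite author's own statement) =====
-- stated objective: faster
-- what changed: Replaced the global heap of all m*n (distance,i,j) tuples popped one by one with distance buckets (dict distance -> pairs in (i,j) order) scanned in sorted-key order, which preserves the heap's lexicographic tie-breaking while only sorting the distinct distances.
-- crash fix: When students is non-empty and there are fewer bicycles than students, A exhausts the heap and raises IndexError; B returns the partial assignment with -1 for the unmatched students. — e.g. on assignBicycles([(0, 0)], []): A raises IndexError, B returns [-1]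
import Mathlib
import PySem

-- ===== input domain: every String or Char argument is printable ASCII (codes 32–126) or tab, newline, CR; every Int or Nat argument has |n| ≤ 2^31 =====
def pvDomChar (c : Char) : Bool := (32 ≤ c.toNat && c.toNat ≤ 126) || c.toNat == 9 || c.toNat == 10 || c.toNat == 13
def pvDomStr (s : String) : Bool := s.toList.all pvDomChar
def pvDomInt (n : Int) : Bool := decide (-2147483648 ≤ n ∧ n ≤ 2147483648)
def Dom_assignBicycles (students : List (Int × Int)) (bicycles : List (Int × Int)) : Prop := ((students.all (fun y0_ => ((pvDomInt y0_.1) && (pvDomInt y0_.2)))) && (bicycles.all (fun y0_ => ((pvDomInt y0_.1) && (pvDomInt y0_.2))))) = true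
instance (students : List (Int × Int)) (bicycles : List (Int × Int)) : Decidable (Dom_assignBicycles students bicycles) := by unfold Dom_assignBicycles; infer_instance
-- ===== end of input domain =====

-- B replaces A's global heap of all (distance, i, j) tuples by distance buckets scanned in
-- sorted-key order (same greedy result, only the distinct distances get sorted): objective faster.


-- ===== PORT A =====
-- heapq on tuples: the heap's only observable is "pop the lexicographically least tuple";
-- the port keeps the pushed tuples as a list and pops the least (first occurrence).
def pvTripLtB (a b : Int × Int × Int) : Bool :=
  decide (a.1 < b.1) || (a.1 == b.1 && (decide (a.2.1 < b.2.1) || (a.2.1 == b.2.1 && decide (a.2.2 < b.2.2))))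

def pvPopMin? : List (Int × Int × Int) → Option ((Int × Int × Int) × List (Int × Int × Int))
  | [] => none
  | x :: xs =>
      let m := xs.foldl (fun m y => if pvTripLtB y m then y else m) x
      some (m, (x :: xs).erase m)

-- the selected minimum is an element of the heap (needed for termination of the pop loop)
theorem pvFoldMin_mem (x : Int × Int × Int) (xs : List (Int × Int × Int)) :
    xs.foldl (fun m y => if pvTripLtB y m then y else m) x ∈ x :: xs := by
  induction xs generalizing x with
  | nil => simp [List.foldl]
  | cons y ys ih =>
      simp only [List.foldl]
      rcases List.mem_cons.1 (ih (if pvTripLtB y x then y else x)) with h | h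
      · rw [h]; by_cases hb : pvTripLtB y x = true <;> simp [hb]
      · simp [List.mem_cons, h]

theorem pvPopMin?_length {h : List (Int × Int × Int)} {t rest}
    (he : pvPopMin? h = some (t, rest)) : rest.length < h.length := by
  cases h with
  | nil => simp [pvPopMin?] at he
  | cons x xs =>
      simp only [pvPopMin?, Option.some.injEq, Prod.mk.injEq] at he
      obtain ⟨ht, hr⟩ := he
      have hm : t ∈ x :: xs := ht ▸ pvFoldMin_mem x xs
      subst hr; rw [ht, List.length_erase_of_mem hm]
      simp only [List.length_cons]
      omega

def pvLoopA (heap : List (Int × Int × Int)) (result : List Int)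
    (aS aB : PySem.Set Int) (n : Nat) : List Int :=
  if aS.length < n then
    match _hpop : pvPopMin? heap with
    | none => result            -- Python raises IndexError here; excluded by Pre_
    | some (t, rest) =>
        if !(PySem.Set.contains aS t.2.1) && !(PySem.Set.contains aB t.2.2) then
          pvLoopA rest (result.set t.2.1.toNat t.2.2) (PySem.Set.add aS t.2.1) (PySem.Set.add aB t.2.2) n
        else
          pvLoopA rest result aS aB n
  else result
termination_by heap.length
decreasing_by all_goals exact pvPopMin?_length _hpop

def assignBicycles (students : List (Int × Int)) (bicycles : List (Int × Int)) : List Int :=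
  let heap := (PySem.List.enumerate students 0).foldl
    (fun h si => (PySem.List.enumerate bicycles 0).foldl
      (fun h bj => h ++ [(|si.2.1 - bj.2.1| + |si.2.2 - bj.2.2|, si.1, bj.1)]) h) []
  pvLoopA heap (List.replicate students.length (-1)) PySem.Set.empty PySem.Set.empty students.length

-- ===== PORT B =====
-- inner loop over one bucket; .inl = the early `return result`
def pvGoPairs : List (Int × Int) → List Int → PySem.Set Int → PySem.Set Int → Nat →
    Sum (List Int) (List Int × PySem.Set Int × PySem.Set Int)
  | [], r, aS, aB, _ => .inr (r, aS, aB)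
  | p :: rest, r, aS, aB, n =>
      if aS.length = n then .inl r
      else if !(PySem.Set.contains aS p.1) && !(PySem.Set.contains aB p.2) then
        pvGoPairs rest (r.set p.1.toNat p.2) (PySem.Set.add aS p.1) (PySem.Set.add aB p.2) n
      else pvGoPairs rest r aS aB n

def pvGoKeys : List Int → PySem.Dict Int (List (Int × Int)) → List Int →
    PySem.Set Int → PySem.Set Int → Nat → List Int
  | [], _, r, _, _, _ => r
  | d :: ks, b, r, aS, aB, n =>
      match pvGoPairs (b.getD d []) r aS aB n with
      | .inl res => res
      | .inr (r', aS', aB') => pvGoKeys ks b r' aS' aB' n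

def assignBicycles_alt (students : List (Int × Int)) (bicycles : List (Int × Int)) : List Int :=
  let buckets := (PySem.List.enumerate students 0).foldl
    (fun b si => (PySem.List.enumerate bicycles 0).foldl
      (fun b bj => b.modify (|si.2.1 - bj.2.1| + |si.2.2 - bj.2.2|) [] (fun l => l ++ [(si.1, bj.1)])) b)
    PySem.Dict.empty
  pvGoKeys (PySem.List.sorted buckets.keys (fun x => x) false) buckets
    (List.replicate students.length (-1)) PySem.Set.empty PySem.Set.empty students.length

-- ===== PRECONDITION & SPEC =====
-- Pre_ excludes exactly the inputs where A raises IndexError (heap exhausted with students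
-- still unassigned): a non-empty student list with fewer bicycles than students.
def Pre_assignBicycles (students : List (Int × Int)) (bicycles : List (Int × Int)) : Prop :=
  students = [] ∨ students.length ≤ bicycles.length
instance (students : List (Int × Int)) (bicycles : List (Int × Int)) : Decidable (Pre_assignBicycles students bicycles) := by
  unfold Pre_assignBicycles; infer_instance

def pvWitness_assignBicycles : (List (Int × Int)) × (List (Int × Int)) := ([(0, 0), (2, 1)], [(1, 1), (3, 3)])

-- When students is non-empty and there are fewer bicycles than students, A exhausts the heap and
-- raises IndexError; B returns the partial assignment with -1 for the unmatched students
-- (Claim_raises_assignBicycles below, proved as theorem assignBicycles_raises at the bottom).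
def Raises_assignBicycles (students : List (Int × Int)) (bicycles : List (Int × Int)) : Prop :=
  students ≠ [] ∧ bicycles.length < students.length
instance (students : List (Int × Int)) (bicycles : List (Int × Int)) : Decidable (Raises_assignBicycles students bicycles) := by
  unfold Raises_assignBicycles; infer_instance

def pvRaiseWitness_assignBicycles : (List (Int × Int)) × (List (Int × Int)) := ([(0, 0)], [])
def pvRaiseWitnessOut_assignBicycles : List Int := [-1]

def Spec_assignBicycles (students : List (Int × Int)) (bicycles : List (Int × Int)) (out : List Int) : Prop := out = assignBicycles_alt students bicycles
instance (students : List (Int × Int)) (bicycles : List (Int × Int)) (out : List Int) : Decidable (Spec_assignBicycles students bicycles out) := by unfold Spec_assignBicycles; infer_instance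

-- ===== CLAIM (what is proved, stated in full; the proofs are below) =====
def Claim_equal_assignBicycles : Prop := ∀ (students : List (Int × Int)) (bicycles : List (Int × Int)), Dom_assignBicycles students bicycles → Pre_assignBicycles students bicycles → Spec_assignBicycles students bicycles (assignBicycles students bicycles)

def Claim_raises_assignBicycles : Prop := (∀ (students : List (Int × Int)) (bicycles : List (Int × Int)), Dom_assignBicycles students bicycles → Raises_assignBicycles students bicycles → ¬ Pre_assignBicycles students bicycles) ∧ (Dom_assignBicycles (pvRaiseWitness_assignBicycles.1) (pvRaiseWitness_assignBicycles.2) ∧ Raises_assignBicycles (pvRaiseWitness_assignBicycles.1) (pvRaiseWitness_assignBicycles.2) ∧ assignBicycles_alt (pvRaiseWitness_assignBicycles.1) (pvRaiseWitness_assignBicycles.2) = pvRaiseWitnessOut_assignBicycles)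

-- ===== LEMMAS AND PROOFS =====

-- non-strict lexicographic order on the (distance, i, j) tuples
def pvTripLe (a b : Int × Int × Int) : Prop :=
  a.1 < b.1 ∨ (a.1 = b.1 ∧ (a.2.1 < b.2.1 ∨ (a.2.1 = b.2.1 ∧ a.2.2 ≤ b.2.2)))

theorem pvLe_refl (a : Int × Int × Int) : pvTripLe a a := by
  unfold pvTripLe; omega

theorem pvLtB_le {a b : Int × Int × Int} (h : pvTripLtB a b = true) : pvTripLe a b := by
  simp [pvTripLtB] at h; unfold pvTripLe; omega

theorem pvLtB_false_le {a b : Int × Int × Int} (h : pvTripLtB a b = false) : pvTripLe b a := by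
  simp [pvTripLtB] at h; unfold pvTripLe; omega

theorem pvLe_trans {a b c : Int × Int × Int} (h1 : pvTripLe a b) (h2 : pvTripLe b c) : pvTripLe a c := by
  unfold pvTripLe at *; omega

theorem pvLe_antisymm {a b : Int × Int × Int} (h1 : pvTripLe a b) (h2 : pvTripLe b a) : a = b := by
  obtain ⟨a1, a2, a3⟩ := a; obtain ⟨b1, b2, b3⟩ := b
  unfold pvTripLe at *; simp_all [Prod.ext_iff]; omega

theorem pvFoldMin_isMin (x : Int × Int × Int) (xs : List (Int × Int × Int)) :
    ∀ y ∈ x :: xs, pvTripLe (xs.foldl (fun m y => if pvTripLtB y m then y else m) x) y := by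
  induction xs generalizing x with
  | nil =>
      intro y hy; simp at hy; subst hy
      simp only [List.foldl]; exact pvLe_refl _
  | cons z zs ih =>
      intro y hy
      simp only [List.foldl]
      have h1 : pvTripLe (zs.foldl (fun m y => if pvTripLtB y m then y else m)
          (if pvTripLtB z x then z else x)) (if pvTripLtB z x then z else x) :=
        ih (if pvTripLtB z x then z else x) _ (by simp)
      have hwx : pvTripLe (if pvTripLtB z x then z else x) x := by
        by_cases hb : pvTripLtB z x = true
        · simpa [hb] using pvLtB_le hb
        · simp only [hb, Bool.false_eq_true, if_neg, not_false_iff]; exact pvLe_refl x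
      have hwz : pvTripLe (if pvTripLtB z x then z else x) z := by
        by_cases hb : pvTripLtB z x = true
        · simp only [hb, if_pos]; exact pvLe_refl z
        · simpa [hb] using pvLtB_false_le (by simpa using hb)
      rcases List.mem_cons.1 hy with h | h
      · subst h; exact pvLe_trans h1 hwx
      · rcases List.mem_cons.1 h with h | h
        · subst h; exact pvLe_trans h1 hwz
        · exact ih _ y (by simp [h])

theorem pvPopMin?_spec {h : List (Int × Int × Int)} {t rest}
    (he : pvPopMin? h = some (t, rest)) :
    t ∈ h ∧ (∀ y ∈ h, pvTripLe t y) ∧ rest = h.erase t := by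
  cases h with
  | nil => simp [pvPopMin?] at he
  | cons x xs =>
      simp only [pvPopMin?, Option.some.injEq, Prod.mk.injEq] at he
      obtain ⟨ht, hr⟩ := he
      subst ht
      exact ⟨pvFoldMin_mem x xs, pvFoldMin_isMin x xs, hr.symm⟩

-- canonical greedy pass over a flat list of (i, j) pairs (proof device shared by both sides)
def pvGreedy : List (Int × Int) → List Int → PySem.Set Int → PySem.Set Int → Nat → List Int
  | [], r, _, _, _ => r
  | p :: rest, r, aS, aB, n =>
      if aS.length = n then r
      else if !(PySem.Set.contains aS p.1) && !(PySem.Set.contains aB p.2) then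
        pvGreedy rest (r.set p.1.toNat p.2) (PySem.Set.add aS p.1) (PySem.Set.add aB p.2) n
      else pvGreedy rest r aS aB n

-- B's nested loops with early return = one greedy pass over the concatenation
theorem pvGoPairs_greedy (l rest : List (Int × Int)) (r : List Int) (aS aB : PySem.Set Int) (n : Nat) :
    pvGreedy (l ++ rest) r aS aB n =
      (match pvGoPairs l r aS aB n with
        | .inl res => res
        | .inr (r', aS', aB') => pvGreedy rest r' aS' aB' n) := by
  induction l generalizing r aS aB with
  | nil => simp [pvGoPairs]
  | cons p l ih =>
      simp only [List.cons_append, pvGreedy, pvGoPairs]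
      by_cases h1 : aS.length = n
      · simp [h1]
      · by_cases h2 : p.1 ∉ aS ∧ p.2 ∉ aB
        · simp [h1, h2, ih]
        · simp [h1, h2, ih]

theorem pvGoKeys_greedy (ks : List Int) (b : PySem.Dict Int (List (Int × Int)))
    (r : List Int) (aS aB : PySem.Set Int) (n : Nat) :
    pvGoKeys ks b r aS aB n = pvGreedy (ks.flatMap (fun d => b.getD d [])) r aS aB n := by
  induction ks generalizing r aS aB with
  | nil => simp [pvGoKeys, pvGreedy]
  | cons d ks ih =>
      simp only [pvGoKeys, List.flatMap_cons]
      rw [pvGoPairs_greedy]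
      cases he : pvGoPairs (b.getD d []) r aS aB n with
      | inl res => simp
      | inr st => obtain ⟨r', aS', aB'⟩ := st; simp [ih]

-- A's pop-min loop = one greedy pass over any pvTripLe-sorted rearrangement of the heap
theorem pvLoopA_greedy : ∀ (N : Nat) (h LT : List (Int × Int × Int)) (r : List Int)
    (aS aB : PySem.Set Int) (n : Nat), h.length < N →
    LT.Perm h → LT.Pairwise pvTripLe → aS.length ≤ n →
    pvLoopA h r aS aB n = pvGreedy (LT.map (fun t => t.2)) r aS aB n := by
  intro N
  induction N with
  | zero => intro h _ _ _ _ _ hN; omega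
  | succ N ih =>
    intro h LT r aS aB n hN hperm hsort hlen
    rw [pvLoopA]
    by_cases hn : aS.length < n
    · cases hp : pvPopMin? h with
      | none =>
          have hnil : h = [] := by
            cases h with
            | nil => rfl
            | cons x xs => simp [pvPopMin?] at hp
          subst hnil
          have : LT = [] := hperm.eq_nil
          simp [hn, this, pvGreedy]
      | some pr =>
          obtain ⟨t, rest⟩ := pr
          obtain ⟨htmem, htmin, hrest⟩ := pvPopMin?_spec hp
          cases LT with
          | nil => exact absurd (hperm.symm.eq_nil ▸ htmem) (by simp)
          | cons a LT' =>
              have ha : a = t := by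
                have hat : pvTripLe t a := htmin a (hperm.mem_iff.1 (by simp))
                have hta : pvTripLe a t := by
                  have hmem : t ∈ a :: LT' := hperm.mem_iff.2 htmem
                  rcases List.mem_cons.1 hmem with h' | h'
                  · exact h' ▸ pvLe_refl t
                  · exact List.rel_of_pairwise_cons hsort h'
                exact (pvLe_antisymm hat hta).symm
              subst ha
              have hperm' : LT'.Perm rest := by
                rw [hrest]
                exact (List.perm_cons a).1 (hperm.trans (List.perm_cons_erase htmem))
              have hsub : rest.length < N := by
                have := pvPopMin?_length hp
                omega
              simp only [hn, if_pos, List.map_cons, pvGreedy, Nat.ne_of_lt hn, reduceIte]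
              by_cases hc : a.2.1 ∉ aS ∧ a.2.2 ∉ aB
              · have hc' : (!(PySem.Set.contains aS a.2.1) && !(PySem.Set.contains aB a.2.2)) = true := by
                  simp [PySem.Set.contains_eq_listContains]
                  tauto
                simp only [hc', if_pos]
                apply ih rest LT' _ _ _ _ hsub hperm' (List.Pairwise.of_cons hsort)
                rw [PySem.Set.add_of_not_mem hc.1]
                simp only [List.length_append, List.length_cons, List.length_nil]
                omega
              · have hc' : ¬((!(PySem.Set.contains aS a.2.1) && !(PySem.Set.contains aB a.2.2)) = true) := by
                  simp [PySem.Set.contains_eq_listContains]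
                  tauto
                simp only [hc']
                exact ih rest LT' _ _ _ _ hsub hperm' (List.Pairwise.of_cons hsort) hlen
    · have hn' : aS.length = n := Nat.le_antisymm hlen (Nat.le_of_not_lt hn)
      cases LT with
      | nil => simp [hn, pvGreedy]
      | cons a LT' => simp [pvGreedy, hn']

-- the flat generation-order list of (distance, i, j) triples
def pvP (students bicycles : List (Int × Int)) : List (Int × Int × Int) :=
  (PySem.List.enumerate students 0).flatMap
    (fun si => (PySem.List.enumerate bicycles 0).map
      (fun bj => (|si.2.1 - bj.2.1| + |si.2.2 - bj.2.2|, si.1, bj.1)))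

theorem pvHeap_eq (students bicycles : List (Int × Int)) :
    (PySem.List.enumerate students 0).foldl
      (fun h si => (PySem.List.enumerate bicycles 0).foldl
        (fun h bj => h ++ [(|si.2.1 - bj.2.1| + |si.2.2 - bj.2.2|, si.1, bj.1)]) h) []
      = pvP students bicycles := by
  simp only [PySem.List.foldl_append_singleton_eq_map, PySem.List.foldl_append_eq_flatMap,
    List.nil_append, pvP]

theorem pvDict_eq (students bicycles : List (Int × Int)) :
    (PySem.List.enumerate students 0).foldl
      (fun b si => (PySem.List.enumerate bicycles 0).foldl
        (fun b bj => b.modify (|si.2.1 - bj.2.1| + |si.2.2 - bj.2.2|) [] (fun l => l ++ [(si.1, bj.1)])) b)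
      PySem.Dict.empty
      = (pvP students bicycles).foldl (fun b t => b.modify t.1 [] (fun l => l ++ [t.2])) PySem.Dict.empty := by
  rw [pvP, List.foldl_flatMap]
  simp only [List.foldl_map]

-- strict lexicographic order on the (i, j) part, the generation order of pvP
theorem pvP_pairwise (students bicycles : List (Int × Int)) :
    (pvP students bicycles).Pairwise
      (fun a b => a.2.1 < b.2.1 ∨ (a.2.1 = b.2.1 ∧ a.2.2 < b.2.2)) := by
  rw [pvP, List.pairwise_flatMap]
  constructor
  · intro si _
    rw [List.pairwise_map]
    exact (PySem.List.pairwise_lt_enumerate bicycles 0).imp (fun h => Or.inr ⟨rfl, h⟩)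
  · apply (PySem.List.pairwise_lt_enumerate students 0).imp
    intro p q hpq x hx y hy
    simp only [List.mem_map] at hx hy
    obtain ⟨b1, _, rfl⟩ := hx; obtain ⟨b2, _, rfl⟩ := hy
    exact Or.inl hpq

-- a Nodup key list covering all keys: bucket concatenation is a permutation of the source
theorem pvFlatMapFilter_perm (ks : List Int) :
    ∀ (l : List (Int × Int × Int)), ks.Nodup → (∀ t ∈ l, t.1 ∈ ks) →
    (ks.flatMap (fun k => l.filter (fun t => t.1 == k))).Perm l := by
  induction ks with
  | nil =>
      intro l _ hcov
      have : l = [] := List.eq_nil_iff_forall_not_mem.2 (fun t ht => by simpa using hcov t ht)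
      simp [this]
  | cons k ks ih =>
      intro l hnd hcov
      simp only [List.flatMap_cons]
      have hstep : ks.flatMap (fun k' => l.filter (fun t => t.1 == k'))
          = ks.flatMap (fun k' => (l.filter (fun t => !(t.1 == k))).filter (fun t => t.1 == k')) := by
        apply List.flatMap_congr
        intro k' hk'
        have hne : k' ≠ k := fun h => (List.nodup_cons.1 hnd).1 (h ▸ hk')
        rw [List.filter_filter]
        apply List.filter_congr
        intro t _
        by_cases h : t.1 = k'
        · simp [h, hne]
        · simp [h]
      rw [hstep]
      have hIH := ih (l.filter (fun t => !(t.1 == k))) (List.nodup_cons.1 hnd).2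
        (fun t ht => by
          have h12 := List.mem_filter.1 ht
          rcases List.mem_cons.1 (hcov t h12.1) with h | h
          · exfalso; simp [h] at h12
          · exact h)
      exact List.Perm.trans (List.Perm.append_left _ hIH) (List.filter_append_perm _ l)

theorem pvMain (students bicycles : List (Int × Int)) :
    assignBicycles students bicycles = assignBicycles_alt students bicycles := by
  unfold assignBicycles assignBicycles_alt
  rw [pvHeap_eq, pvDict_eq]
  set P := pvP students bicycles with hP
  set buckets := P.foldl (fun b t => b.modify t.1 [] (fun l => l ++ [t.2])) PySem.Dict.empty with hB
  set ks := PySem.List.sorted buckets.keys (fun x => x) false with hks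
  -- keys of the bucket dict: the distinct distances, so ks covers P and is Nodup and strictly increasing
  have hkeys : buckets.keys = PySem.Set.ofList (P.map (fun t => t.1)) := by
    rw [hB, PySem.Dict.keys_foldl_modify_key P (fun t => t.1) [] (fun _ t => fun l => l ++ [t.2])]
    simp [PySem.Set.update_nil_left, PySem.Dict.keys_empty]
  have hksnodup : ks.Nodup := by
    refine (PySem.List.sorted_perm buckets.keys (fun x => x) false).nodup_iff.mpr ?_
    rw [hkeys]; exact PySem.Set.nodup_ofList _
  have hcov : ∀ t ∈ P, t.1 ∈ ks := by
    intro t ht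
    rw [hks, PySem.List.mem_sorted, hkeys, PySem.Set.mem_ofList]
    exact List.mem_map.2 ⟨t, ht, rfl⟩
  -- LT: the bucket concatenation as triples
  set LT := ks.flatMap (fun k => P.filter (fun t => t.1 == k)) with hLT
  have hperm : LT.Perm P := pvFlatMapFilter_perm ks P hksnodup hcov
  -- LT is pvTripLe-sorted
  have hkslt : ks.Pairwise (· < ·) := by
    have h1 : ks.Pairwise (· ≤ ·) := PySem.List.sorted_pairwise buckets.keys (fun x => x)
    have h2 : ks.Pairwise (· ≠ ·) := hksnodup
    exact (h1.and h2).imp (fun ⟨hle, hne⟩ => lt_of_le_of_ne hle hne)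
  have hsort : LT.Pairwise pvTripLe := by
    rw [hLT, List.pairwise_flatMap]
    constructor
    · intro k _
      have := ((pvP_pairwise students bicycles).filter (fun t => t.1 == k))
      rw [List.pairwise_iff_forall_sublist] at this ⊢
      intro a b hab
      have hij := this hab
      have hmem := hab.subset
      have hamem : a ∈ List.filter (fun t => t.1 == k) P := hmem (by simp)
      have hbmem : b ∈ List.filter (fun t => t.1 == k) P := hmem (by simp)
      have ha : a.1 = k := by simpa using (List.mem_filter.1 hamem).2
      have hb : b.1 = k := by simpa using (List.mem_filter.1 hbmem).2
      unfold pvTripLe; omega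
    · apply hkslt.imp
      intro k1 k2 hk x hx y hy
      have hx1 : x.1 = k1 := by simpa using (List.mem_filter.1 hx).2
      have hy1 : y.1 = k2 := by simpa using (List.mem_filter.1 hy).2
      unfold pvTripLe; omega
  -- left side: pop-min loop over P = greedy over LT's pair projection
  rw [pvLoopA_greedy (P.length + 1) P LT _ _ _ _ (by omega) hperm hsort (by simp)]
  -- right side: nested bucket loops = greedy over the bucket concatenation
  rw [pvGoKeys_greedy]
  congr 1
  -- bucket lookup = filter of P, then push the projection through the flatMap
  have hget : ∀ k, buckets.getD k [] = (P.filter (fun t => t.1 == k)).map (fun t => t.2) := by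
    intro k
    rw [hB]
    have := PySem.Dict.getD_foldl_modify_append P PySem.Dict.empty k
    simpa [PySem.Dict.getD_empty] using this
  rw [hLT, List.map_flatMap]
  exact List.flatMap_congr (fun k _ => (hget k).symm)

-- ===== VERDICT (by name: the statement is the Claim_ definition above) =====
theorem assignBicycles_spec : Claim_equal_assignBicycles := by
  intro students bicycles _ _
  unfold Spec_assignBicycles
  exact pvMain students bicycles

def assignBicycles_raises : Claim_raises_assignBicycles := by
  unfold Claim_raises_assignBicycles
  refine ⟨?_, by decide⟩
  intro students bicycles _ hr hp
  obtain ⟨h1, h2⟩ := hr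
  rcases hp with h | h
  · exact h1 h
  · omega
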